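-- pv_equiv track=rewrite | github.com/jibf/agent_hard_benchmark | tau2-bench/data/simulations/analyze_files.py | select_most_recent_per_domain
-- ===== SOURCE A (Python) =====
-- from collections import defaultdict
--
-- def select_most_recent_per_domain(model_pairs):
--     """Select the most recent file per domain for each model pair"""
--     selected_files = {}
--
--     for pair_key, files in model_pairs.items():
--         # Group files by domain
--         domain_files = defaultdict(list)
--         for file_info in files:
--             domain_files[file_info['domain']].append(file_info)
--
--         # Select most recent file per domain
--         for domain, domain_file_list in domain_files.items():
--             most_recent = max(domain_file_list, key=lambda x: x['timestamp'])
--             selected_files[f"{pair_key}_{domain}"] = most_recent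
--
--     return selected_files
-- ===== SOURCE B (Python) =====
-- def select_most_recent_per_domain(model_pairs):
--     """Select the most recent file per domain for each model pair"""
--     selected_files = {}
--     for pair_key, files in model_pairs.items():
--         for file_info in files:
--             key = f"{pair_key}_{file_info['domain']}"
--             best = selected_files.get(key)
--             if best is None or file_info['timestamp'] > best['timestamp']:
--                 selected_files[key] = file_info
--     return selected_files
-- ===== Notes on version B (the rewrite author's own statement) =====
-- stated objective: simpler
-- what changed: Replaced the per-pair defaultdict grouping plus a second max()-per-group loop by a single streaming pass that keeps the running most-recent file per composite key (strict '>' preserves max()'s first-wins ties); Pre_ excludes inputs where a file dict lacks 'domain'/'timestamp' (A raises KeyError), assoc lists with duplicate keys (unrepresentable in a Python dict), and inputs whose composite f-string keys collide across two pairs, where A's silent last-pair overwrite is an accident of the ambiguous key format.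
import Mathlib
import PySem

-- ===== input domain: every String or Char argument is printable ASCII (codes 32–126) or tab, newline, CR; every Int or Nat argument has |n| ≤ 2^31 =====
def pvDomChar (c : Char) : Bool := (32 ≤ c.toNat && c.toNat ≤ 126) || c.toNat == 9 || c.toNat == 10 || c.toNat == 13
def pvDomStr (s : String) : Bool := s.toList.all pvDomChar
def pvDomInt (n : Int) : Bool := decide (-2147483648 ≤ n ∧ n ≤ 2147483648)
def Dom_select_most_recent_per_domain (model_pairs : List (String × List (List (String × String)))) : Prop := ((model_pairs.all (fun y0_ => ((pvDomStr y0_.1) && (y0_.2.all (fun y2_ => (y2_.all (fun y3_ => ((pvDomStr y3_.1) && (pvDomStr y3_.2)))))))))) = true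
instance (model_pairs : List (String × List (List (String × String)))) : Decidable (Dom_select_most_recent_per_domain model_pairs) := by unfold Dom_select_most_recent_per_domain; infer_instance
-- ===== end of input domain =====

-- B replaces A's per-pair defaultdict grouping + second max()-per-group loop by one streaming
-- running-best pass (strict '>' keeps max()'s first-wins tie behaviour); objective: simpler.

-- shared helpers: the dict lookups file_info['domain'] / file_info['timestamp'] (both Pythons do them identically;
-- Pre_ guarantees the keys are present, so the "" default is never the result of a lookup Python would raise on)
def pvFiDomain (fi : List (String × String)) : String := (PySem.Dict.mk fi).getD "domain" ""
def pvFiTs (fi : List (String × String)) : String := (PySem.Dict.mk fi).getD "timestamp" ""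

-- ===== PORT A =====
-- A-side helpers: the grouping loop body, the per-domain max selection loop body, and one pair's processing
def pvGroupStep (d : PySem.Dict String (List (List (String × String)))) (fi : List (String × String)) : PySem.Dict String (List (List (String × String))) :=
  d.modify (pvFiDomain fi) [] (fun g => g ++ [fi])

def pvSelectStep (pk : String) (sel : PySem.Dict String (List (String × String))) (dg : String × List (List (String × String))) : PySem.Dict String (List (String × String)) :=
  match PySem.List.max? dg.2 pvFiTs with
  | some most_recent => sel.insert (pk ++ "_" ++ dg.1) most_recent
  | none => sel

def pvPairStepA (sel : PySem.Dict String (List (String × String))) (p : String × List (List (String × String))) : PySem.Dict String (List (String × String)) :=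
  let domain_files := p.2.foldl pvGroupStep PySem.Dict.empty
  domain_files.items.foldl (pvSelectStep p.1) sel

def select_most_recent_per_domain (model_pairs : List (String × List (List (String × String)))) : List (String × List (String × String)) :=
  (model_pairs.foldl pvPairStepA PySem.Dict.empty).items

-- ===== PORT B =====
-- B-side helpers: the single streaming update for one file, and one pair's processing
def pvScanStep (pk : String) (sel : PySem.Dict String (List (String × String))) (fi : List (String × String)) : PySem.Dict String (List (String × String)) :=
  let key := pk ++ "_" ++ pvFiDomain fi
  match sel.get? key with
  | none => sel.insert key fi
  | some best => if pvFiTs best < pvFiTs fi then sel.insert key fi else sel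

def pvPairStepB (sel : PySem.Dict String (List (String × String))) (p : String × List (List (String × String))) : PySem.Dict String (List (String × String)) :=
  p.2.foldl (pvScanStep p.1) sel

def select_most_recent_per_domain_alt (model_pairs : List (String × List (List (String × String)))) : List (String × List (String × String)) :=
  (model_pairs.foldl pvPairStepB PySem.Dict.empty).items

-- ===== PRECONDITION & SPEC =====
def pvCKey (pk : String) (fi : List (String × String)) : String := pk ++ "_" ++ pvFiDomain fi

-- Pre_ excludes (a) inputs where A raises KeyError (a file dict missing 'domain' or 'timestamp'),
-- (b) assoc lists with duplicate keys, which a Python dict cannot carry, and (c) inputs whose f-string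
-- composite keys pair_key+underscore+domain collide across two different pairs, where A's silent dict overwrite
-- (last pair wins regardless of timestamps) and B's timestamp comparison are both accidental readings
-- of one ambiguous flat "Key" "Format" (two different pairs can write the same composite key).
def Pre_select_most_recent_per_domain (model_pairs : List (String × List (List (String × String)))) : Prop :=
  (∀ p ∈ model_pairs, ∀ fi ∈ p.2,
     (PySem.Dict.mk fi).contains "timestamp" = true ∧ (PySem.Dict.mk fi).contains "domain" = true ∧ (fi.map (·.1)).Nodup)
  ∧ (model_pairs.map (·.1)).Nodup
  ∧ model_pairs.Pairwise (fun p q => ∀ a ∈ p.2, ∀ b ∈ q.2, pvCKey p.1 a ≠ pvCKey q.1 b)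
instance (model_pairs : List (String × List (List (String × String)))) : Decidable (Pre_select_most_recent_per_domain model_pairs) := by unfold Pre_select_most_recent_per_domain; infer_instance

def pvWitness_select_most_recent_per_domain : (List (String × List (List (String × String)))) :=
  [("domain", [[("domain", "domain"), ("timestamp", "timestamp")]])]

def Spec_select_most_recent_per_domain (model_pairs : List (String × List (List (String × String)))) (out : List (String × List (String × String))) : Prop := out = select_most_recent_per_domain_alt model_pairs
instance (model_pairs : List (String × List (List (String × String)))) (out : List (String × List (String × String))) : Decidable (Spec_select_most_recent_per_domain model_pairs out) := by unfold Spec_select_most_recent_per_domain; infer_instance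

-- ===== CLAIM (what is proved, stated in full; the proofs are below) =====
def Claim_equal_select_most_recent_per_domain : Prop := ∀ (model_pairs : List (String × List (List (String × String)))), Dom_select_most_recent_per_domain model_pairs → Pre_select_most_recent_per_domain model_pairs → Spec_select_most_recent_per_domain model_pairs (select_most_recent_per_domain model_pairs)

-- ===== LEMMAS AND PROOFS =====

-- appending "pk_" in front is injective in the domain part
theorem pvKey_inj (pk : String) : Function.Injective (fun d => pk ++ "_" ++ d) := by
  intro d1 d2 h
  exact (String.append_right_inj (pk ++ "_")).mp h

-- set(map f xs) = map f (set xs) for injective f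
theorem pvOfList_map {α β : Type} [BEq α] [LawfulBEq α] [BEq β] [LawfulBEq β]
    {f : α → β} (hf : Function.Injective f) (l : List α) :
    PySem.Set.ofList (l.map f) = (PySem.Set.ofList l).map f := by
  induction l using List.reverseRecOn with
  | nil => rfl
  | append_singleton l x ih =>
    rw [List.map_append, List.map_singleton, PySem.Set.ofList_append_singleton,
        PySem.Set.ofList_append_singleton, ih, PySem.Set.add_eq_ite, PySem.Set.add_eq_ite]
    by_cases hx : x ∈ PySem.Set.ofList l
    · simp [hx, List.mem_map_of_mem]
    · have : f x ∉ (PySem.Set.ofList l).map f := by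
        intro hmem
        obtain ⟨y, hy, hxy⟩ := List.mem_map.mp hmem
        exact hx (hf hxy ▸ hy)
      simp [hx, this]

-- what B's scan holds at key k: the running max?-fold over the files whose composite key is k
theorem pvB_get? (pk : String) (files : List (List (String × String)))
    (sel : PySem.Dict String (List (String × String))) (k : String) :
    (files.foldl (pvScanStep pk) sel).get? k =
      (files.filter (fun fi => pvCKey pk fi == k)).foldl
        (fun acc fi => match acc with
          | none => some fi
          | some m => if pvFiTs m < pvFiTs fi then some fi else some m)
        (sel.get? k) := by
  induction files generalizing sel with
  | nil => rfl
  | cons fi t ih =>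
    rw [List.foldl_cons, ih, List.filter_cons]
    by_cases hk : pvCKey pk fi = k
    · subst hk
      simp only [beq_self_eq_true, if_pos, List.foldl_cons]
      congr 1
      unfold pvScanStep pvCKey
      cases h : sel.get? (pk ++ "_" ++ pvFiDomain fi) with
      | none => simp only [h]; rw [PySem.Dict.get?_insert_self]
      | some b =>
        simp only [h]
        by_cases hts : pvFiTs b < pvFiTs fi
        · rw [if_pos hts, PySem.Dict.get?_insert_self, if_pos hts]
        · rw [if_neg hts, if_neg hts]
          exact h
    · have hk' : k ≠ pk ++ "_" ++ pvFiDomain fi := fun hh => hk (by simpa [pvCKey] using hh.symm)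
      have hb : (pvCKey pk fi == k) = false := beq_eq_false_iff_ne.mpr hk
      simp only [hb, Bool.false_eq_true]
      congr 1
      unfold pvScanStep
      cases h : sel.get? (pk ++ "_" ++ pvFiDomain fi) with
      | none => simp only [h]; rw [PySem.Dict.get?_insert, if_neg hk']
      | some b =>
        simp only [h]
        by_cases hts : pvFiTs b < pvFiTs fi
        · rw [if_pos hts, PySem.Dict.get?_insert, if_neg hk']
        · rw [if_neg hts]

-- keys of B's scan: the old keys updated (set-style) with the composite keys in order
theorem pvB_keys (pk : String) (files : List (List (String × String)))
    (sel : PySem.Dict String (List (String × String))) :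
    (files.foldl (pvScanStep pk) sel).keys = PySem.Set.update sel.keys (files.map (pvCKey pk)) := by
  induction files generalizing sel with
  | nil => rfl
  | cons fi t ih =>
    rw [List.foldl_cons, List.map_cons, PySem.Set.update_cons, ih]
    congr 1
    unfold pvScanStep
    cases h : sel.get? (pk ++ "_" ++ pvFiDomain fi) with
    | none =>
      have hmem : pvCKey pk fi ∉ sel.keys := (PySem.Dict.get?_eq_none_iff_not_mem_keys sel _).mp h
      have hc : sel.contains (pk ++ "_" ++ pvFiDomain fi) = false := by
        rw [PySem.Dict.contains_eq_decide_mem_keys]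
        simpa [pvCKey] using hmem
      simp only [h]
      rw [PySem.Dict.keys_insert_of_not_contains _ _ hc, PySem.Set.add_of_not_mem hmem]
      rfl
    | some b =>
      have hmem : pvCKey pk fi ∈ sel.keys := by
        by_contra hno
        rw [← PySem.Dict.get?_eq_none_iff_not_mem_keys] at hno
        unfold pvCKey at hno
        rw [hno] at h
        exact absurd h (by simp)
      have hc : sel.contains (pk ++ "_" ++ pvFiDomain fi) = true := by
        rw [PySem.Dict.contains_eq_decide_mem_keys]
        simpa [pvCKey] using hmem
      simp only [h]
      by_cases hts : pvFiTs b < pvFiTs fi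
      · rw [if_pos hts, PySem.Dict.keys_insert_of_contains _ _ hc, PySem.Set.add_of_mem hmem]
      · rw [if_neg hts, PySem.Set.add_of_mem hmem]

-- A's grouping dict: keys are the distinct domains in first-occurrence order, value = the filtered group
theorem pvDf_keys (files : List (List (String × String))) :
    (files.foldl pvGroupStep PySem.Dict.empty).keys = PySem.Set.ofList (files.map pvFiDomain) := by
  unfold pvGroupStep
  rw [PySem.Dict.keys_foldl_modify_key files pvFiDomain ([] : List (List (String × String)))
    (fun _ fi => fun g => g ++ [fi]) PySem.Dict.empty]
  rw [PySem.Dict.keys_empty, PySem.Set.update_nil_left]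

theorem pvDf_getD (files : List (List (String × String))) (d : String) :
    (files.foldl pvGroupStep PySem.Dict.empty).getD d [] = files.filter (fun fi => pvFiDomain fi == d) := by
  induction files using List.reverseRecOn with
  | nil => rfl
  | append_singleton l fi ih =>
    rw [List.foldl_append, List.foldl_cons, List.foldl_nil, List.filter_append, List.filter_cons,
        List.filter_nil]
    unfold pvGroupStep at ih ⊢
    rw [PySem.Dict.getD_modify]
    by_cases hdd : d = pvFiDomain fi
    · subst hdd
      simp [ih]
    · have hne : (pvFiDomain fi == d) = false := beq_eq_false_iff_ne.mpr (fun h => hdd h.symm)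
      simp [hdd, hne, ih]

theorem pvDf_items (files : List (List (String × String))) :
    (files.foldl pvGroupStep PySem.Dict.empty).items =
      (PySem.Set.ofList (files.map pvFiDomain)).map (fun d => (d, files.filter (fun fi => pvFiDomain fi == d))) := by
  have hnd : (files.foldl pvGroupStep PySem.Dict.empty).keys.Nodup := by
    rw [pvDf_keys]; exact PySem.Set.nodup_ofList _
  rw [PySem.Dict.items_eq_map_keys _ hnd [], pvDf_keys]
  exact List.map_congr_left (fun d _ => by rw [pvDf_getD])

theorem pvPairB_keys (pk : String) (files : List (List (String × String)))
    (sel : PySem.Dict String (List (String × String)))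
    (hfresh : ∀ fi ∈ files, pvCKey pk fi ∉ sel.keys) :
    (pvPairStepB sel (pk, files)).keys = sel.keys ++ PySem.Set.ofList (files.map (pvCKey pk)) := by
  show (files.foldl (pvScanStep pk) sel).keys = _
  rw [pvB_keys, PySem.Set.update_eq_append_filter]
  congr 1
  apply List.filter_eq_self.mpr
  intro y hy
  obtain ⟨fi, hfi, rfl⟩ := List.mem_map.mp ((PySem.Set.mem_ofList _ _).mp hy)
  cases hcase : PySem.Set.contains sel.keys (pvCKey pk fi) with
  | false => simp
  | true =>
    have : pvCKey pk fi ∈ sel.keys := by simpa using hcase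
    exact absurd this (hfresh fi hfi)

-- one pair: grouping + per-group max equals the streaming scan, given fresh composite keys
theorem pvPair_eq (pk : String) (files : List (List (String × String)))
    (sel : PySem.Dict String (List (String × String)))
    (hnd : sel.keys.Nodup) (hfresh : ∀ fi ∈ files, pvCKey pk fi ∉ sel.keys) :
    pvPairStepA sel (pk, files) = pvPairStepB sel (pk, files) := by
  have hfresh' : ∀ d ∈ PySem.Set.ofList (files.map pvFiDomain), (pk ++ "_" ++ d) ∉ sel.keys := by
    intro d hd
    obtain ⟨fi, hfi, rfl⟩ := List.mem_map.mp ((PySem.Set.mem_ofList _ _).mp hd)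
    exact hfresh fi hfi
  have hA : (pvPairStepA sel (pk, files)).items
      = sel.items ++ (PySem.Set.ofList (files.map pvFiDomain)).map
          (fun d => (pk ++ "_" ++ d,
            (PySem.List.max? (files.filter (fun fi => pvFiDomain fi == d)) pvFiTs).getD [])) := by
    show (((files.foldl pvGroupStep PySem.Dict.empty).items).foldl (pvSelectStep pk) sel).items = _
    have hcong : ((files.foldl pvGroupStep PySem.Dict.empty).items).foldl (pvSelectStep pk) sel
        = ((files.foldl pvGroupStep PySem.Dict.empty).items).foldl
            (fun s a => s.insert (pk ++ "_" ++ a.1) ((PySem.List.max? a.2 pvFiTs).getD [])) sel := by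
      apply PySem.List.foldl_congr_mem
      intro acc a ha
      rw [pvDf_items] at ha
      obtain ⟨d, hd, rfl⟩ := List.mem_map.mp ha
      obtain ⟨fi, hfi, hdom⟩ := List.mem_map.mp ((PySem.Set.mem_ofList _ _).mp hd)
      have hmemf : fi ∈ files.filter (fun fi => pvFiDomain fi == d) :=
        List.mem_filter.mpr ⟨hfi, by simp [hdom]⟩
      have hne : files.filter (fun fi => pvFiDomain fi == d) ≠ [] := List.ne_nil_of_mem hmemf
      obtain ⟨m, hm⟩ : ∃ m, PySem.List.max? (files.filter (fun fi => pvFiDomain fi == d)) pvFiTs = some m := by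
        cases hx : PySem.List.max? (files.filter (fun fi => pvFiDomain fi == d)) pvFiTs with
        | none => exact absurd ((PySem.List.max?_eq_none_iff _ _).mp hx) hne
        | some m => exact ⟨m, rfl⟩
      unfold pvSelectStep
      simp [hm]
    rw [hcong]
    rw [PySem.Dict.items_foldl_insert_fresh ((files.foldl pvGroupStep PySem.Dict.empty).items)
        (fun a => pk ++ "_" ++ a.1) (fun a => (PySem.List.max? a.2 pvFiTs).getD []) sel ?fresh ?nod]
    case fresh =>
      intro a ha
      rw [pvDf_items] at ha
      obtain ⟨d, hd, rfl⟩ := List.mem_map.mp ha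
      rw [PySem.Dict.contains_eq_decide_mem_keys]
      simpa using hfresh' d hd
    case nod =>
      rw [pvDf_items, List.map_map]
      exact (PySem.Set.nodup_ofList _).map (pvKey_inj pk)
    rw [pvDf_items, List.map_map]
    rfl
  have hkeysB : (pvPairStepB sel (pk, files)).keys
      = sel.keys ++ (PySem.Set.ofList (files.map pvFiDomain)).map (fun d => pk ++ "_" ++ d) := by
    rw [pvPairB_keys pk files sel hfresh]
    congr 1
    have hmm : files.map (pvCKey pk) = (files.map pvFiDomain).map (fun d => pk ++ "_" ++ d) := by
      rw [List.map_map]; rfl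
    rw [hmm, pvOfList_map (pvKey_inj pk)]
  have hndB : (pvPairStepB sel (pk, files)).keys.Nodup := by
    rw [hkeysB]
    refine List.nodup_append.mpr ⟨hnd, (PySem.Set.nodup_ofList _).map (pvKey_inj pk), ?_⟩
    intro a ha b hbmem heq
    obtain ⟨d, hd, rfl⟩ := List.mem_map.mp hbmem
    exact hfresh' d hd (heq ▸ ha)
  have hBitems : (pvPairStepB sel (pk, files)).items
      = sel.items ++ (PySem.Set.ofList (files.map pvFiDomain)).map
          (fun d => (pk ++ "_" ++ d,
            (PySem.List.max? (files.filter (fun fi => pvFiDomain fi == d)) pvFiTs).getD [])) := by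
    rw [PySem.Dict.items_eq_map_keys _ hndB [], hkeysB, List.map_append]
    congr 1
    · have hold : ∀ x ∈ sel.keys,
          (x, (pvPairStepB sel (pk, files)).getD x []) = (x, sel.getD x []) := by
        intro x hx
        have hget : (pvPairStepB sel (pk, files)).get? x = sel.get? x := by
          show (files.foldl (pvScanStep pk) sel).get? x = sel.get? x
          rw [pvB_get?]
          have hfil : files.filter (fun fi => pvCKey pk fi == x) = [] := by
            apply List.filter_eq_nil_iff.mpr
            intro fi hfi
            simp only [beq_iff_eq]
            exact fun hh => hfresh fi hfi (hh ▸ hx)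
          rw [hfil, List.foldl_nil]
        simp [PySem.Dict.getD_eq_get?_getD, hget]
      rw [List.map_congr_left hold]
      exact (PySem.Dict.items_eq_map_keys sel hnd []).symm
    · rw [List.map_map]
      apply List.map_congr_left
      intro d hd
      simp only [Function.comp]
      simp only [Prod.mk.injEq, true_and]
      have hnone : sel.get? (pk ++ "_" ++ d) = none :=
        (PySem.Dict.get?_eq_none_iff_not_mem_keys sel _).mpr (hfresh' d hd)
      show (files.foldl (pvScanStep pk) sel).getD (pk ++ "_" ++ d) [] = _
      rw [PySem.Dict.getD_eq_get?_getD, pvB_get?, hnone]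
      have hfil : files.filter (fun fi => pvCKey pk fi == (pk ++ "_" ++ d))
          = files.filter (fun fi => pvFiDomain fi == d) := by
        apply List.filter_congr
        intro fi _
        by_cases hdd : pvFiDomain fi = d
        · simp [pvCKey, hdd]
        · have h1 : (pvCKey pk fi == pk ++ "_" ++ d) = false :=
            beq_eq_false_iff_ne.mpr (fun hh => hdd (pvKey_inj pk (by simpa [pvCKey] using hh)))
          have h2 : (pvFiDomain fi == d) = false := beq_eq_false_iff_ne.mpr hdd
          rw [h1, h2]
      rw [hfil]
      have hmax : PySem.List.max? (files.filter (fun fi => pvFiDomain fi == d)) pvFiTs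
          = List.foldl (fun acc fi => match acc with
              | none => some fi
              | some m => if pvFiTs m < pvFiTs fi then some fi else some m) none
              (files.filter (fun fi => pvFiDomain fi == d)) := by
        simp only [PySem.List.max?]
        apply PySem.List.foldl_congr_mem
        intro acc x _
        cases acc <;> rfl
      rw [hmax]
  apply PySem.Dict.ext
  rw [hA, hBitems]

theorem pvMain (mps : List (String × List (List (String × String))))
    (sel : PySem.Dict String (List (String × String)))
    (hnd : sel.keys.Nodup)
    (hfresh : ∀ p ∈ mps, ∀ fi ∈ p.2, pvCKey p.1 fi ∉ sel.keys)
    (hpw : mps.Pairwise (fun p q => ∀ a ∈ p.2, ∀ b ∈ q.2, pvCKey p.1 a ≠ pvCKey q.1 b)) :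
    mps.foldl pvPairStepA sel = mps.foldl pvPairStepB sel := by
  induction mps generalizing sel with
  | nil => rfl
  | cons p rest ih =>
    obtain ⟨pk, files⟩ := p
    have hmemhd : (pk, files) ∈ (pk, files) :: rest := by simp
    have hfreshp : ∀ fi ∈ files, pvCKey pk fi ∉ sel.keys :=
      fun fi hfi => hfresh (pk, files) hmemhd fi hfi
    obtain ⟨hhead, htail⟩ := List.pairwise_cons.mp hpw
    rw [List.foldl_cons, List.foldl_cons, pvPair_eq pk files sel hnd hfreshp]
    apply ih
    · rw [pvPairB_keys pk files sel hfreshp]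
      refine List.nodup_append.mpr ⟨hnd, PySem.Set.nodup_ofList _, ?_⟩
      intro a ha b hbmem heq
      obtain ⟨fi, hfi, rfl⟩ := List.mem_map.mp ((PySem.Set.mem_ofList _ _).mp hbmem)
      exact hfreshp fi hfi (heq ▸ ha)
    · intro q hq b hb
      rw [pvPairB_keys pk files sel hfreshp, List.mem_append]
      rintro (hin | hin)
      · exact hfresh q (List.mem_cons_of_mem _ hq) b hb hin
      · obtain ⟨a, hafi, heq⟩ := List.mem_map.mp ((PySem.Set.mem_ofList _ _).mp hin)
        exact hhead q hq a hafi b hb heq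
    · exact htail

-- ===== VERDICT (by name: the statement is the Claim_ definition above) =====
theorem select_most_recent_per_domain_spec : Claim_equal_select_most_recent_per_domain := by
  intro mp _ hpre
  unfold Spec_select_most_recent_per_domain select_most_recent_per_domain select_most_recent_per_domain_alt
  rw [pvMain mp PySem.Dict.empty (by simp) (by simp) hpre.2.2]
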